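-- pv_equiv track=rewrite | github.com/alonShevach/introduction-to-CS | ex6/wave_editor.py | slow_down_wave
-- ===== SOURCE A (Python) =====
-- def create_list_for_average(lst1, lst2, lst3=None):
--     """
--     The following function gets 3 arguments,
--      3 lists and create an average of
--     their content. if the user is giving 2 lists it gives the average of
--     :param lst1:list number 1
--     :param lst2:list number 2
--     :param lst3:list number 3 (optional)
--     :return: list of averages
--     """
--     # If we have 3 lists, we need to divide the sum by 3,
--     # If we have 2 lists, we need to divide the sum by 2.
--     new_list = list()
--     for i in range(len(lst1)):
--         if lst3:
--             new_element = int((lst1[i] + lst2[i] + lst3[i]) / 3)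
--         else:
--             new_element = int((lst1[i] + lst2[i]) / 2)
--         new_list.append(new_element)
--     return new_list
--
-- def slow_down_wave(wave_lst):
--     """
--     The following function slows down the wave by adding more objects to the list,
--     creating a new list which is equal to the previous but
--     between 2 objects it inserts the average of them
--     :param wave_lst:
--     :return: new list of slowed wave date
--     """
--     new_lst = list()
--     average_list = list()
--     for i in range(len(wave_lst) - 1):
--         # Adding the average of 2 numbers between them.
--         average_list.append(create_list_for_average(wave_lst[i], wave_lst[i + 1]))
--     for j in range(len(wave_lst)):
--         new_lst.append(wave_lst[j])
--         if not j > len(average_list) - 1: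
--             new_lst.append(average_list[j])
--     return new_lst
-- ===== SOURCE B (Python) =====
-- def slow_down_wave(wave_lst):
--     # Closed-form over output positions: result has 2n-1 slots; even slots k hold
--     # wave_lst[k//2], odd slots hold the element-wise truncated mean of the two
--     # frames around them. No pair iteration and no intermediate table.
--     n = len(wave_lst)
--     return [wave_lst[k // 2] if k % 2 == 0 else
--             [int((wave_lst[k // 2][t] + wave_lst[k // 2 + 1][t]) / 2)
--              for t in range(len(wave_lst[k // 2]))]
--             for k in range(2 * n - 1)]
-- ===== Notes on version B (the rewrite author's own statement) =====
-- stated objective: alternative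
-- what changed: B replaces A's two sequential loops (build an average table, then merge it in by index with a bound check) by a single closed-form comprehension over the 2n-1 OUTPUT positions, computing each slot from its index parity (even -> wave_lst[k//2], odd -> average of the two neighbouring frames); no intermediate average_list and no appends.
import Mathlib
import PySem

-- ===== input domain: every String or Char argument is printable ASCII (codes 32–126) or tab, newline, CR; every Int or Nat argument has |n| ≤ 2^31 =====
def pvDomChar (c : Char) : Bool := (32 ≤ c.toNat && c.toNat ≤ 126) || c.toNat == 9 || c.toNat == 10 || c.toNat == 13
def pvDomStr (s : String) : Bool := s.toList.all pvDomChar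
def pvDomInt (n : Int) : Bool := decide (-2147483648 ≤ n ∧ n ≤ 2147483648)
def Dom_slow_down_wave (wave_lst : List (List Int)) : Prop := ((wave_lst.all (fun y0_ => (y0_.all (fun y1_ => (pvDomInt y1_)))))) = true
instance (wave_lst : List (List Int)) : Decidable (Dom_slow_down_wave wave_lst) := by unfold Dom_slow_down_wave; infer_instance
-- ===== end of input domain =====

-- B computes the output by a closed-form comprehension over the 2n-1 output positions,
-- indexed by parity, instead of A's average table followed by an index-merging loop (objective: alternative).

-- ===== PORT A =====
-- int((x+y)/2) is exact float arithmetic for |x|,|y| ≤ 2^31 and truncates toward zero: Int.tdiv.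
-- lst3 is always None at the call site, so only the two-list branch is ported.
def create_list_for_average (lst1 lst2 : List Int) : List Int :=
  (PySem.List.pyRange 0 (lst1.length : Int) 1).foldl
    (fun new_list i =>
      new_list ++ [(PySem.List.pyGetD lst1 i 0 + PySem.List.pyGetD lst2 i 0).tdiv 2]) []

def slow_down_wave (wave_lst : List (List Int)) : List (List Int) :=
  let average_list :=
    (PySem.List.pyRange 0 ((wave_lst.length : Int) - 1) 1).foldl
      (fun acc i =>
        acc ++ [create_list_for_average (PySem.List.pyGetD wave_lst i [])
                  (PySem.List.pyGetD wave_lst (i + 1) [])]) []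
  (PySem.List.pyRange 0 (wave_lst.length : Int) 1).foldl
    (fun new_lst j =>
      let new_lst := new_lst ++ [PySem.List.pyGetD wave_lst j []]
      if ¬ (j > (average_list.length : Int) - 1) then
        new_lst ++ [PySem.List.pyGetD average_list j []]
      else new_lst) []

-- ===== PORT B =====
def slow_down_wave_alt (wave_lst : List (List Int)) : List (List Int) :=
  let n : Int := wave_lst.length
  (PySem.List.pyRange 0 (2 * n - 1) 1).map (fun k =>
    if k % 2 = 0 then
      PySem.List.pyGetD wave_lst (PySem.Int.floordiv k 2) []
    else
      (PySem.List.pyRange 0 ((PySem.List.pyGetD wave_lst (PySem.Int.floordiv k 2) []).length : Int) 1).map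
        (fun t =>
          (PySem.List.pyGetD (PySem.List.pyGetD wave_lst (PySem.Int.floordiv k 2) []) t 0 +
           PySem.List.pyGetD (PySem.List.pyGetD wave_lst (PySem.Int.floordiv k 2 + 1) []) t 0).tdiv 2))

-- ===== PRECONDITION & SPEC =====
-- Pre_ excludes exactly the inputs on which A raises IndexError: some inner list longer than its successor.
def Pre_slow_down_wave (wave_lst : List (List Int)) : Prop :=
  ∀ p ∈ wave_lst.zip (wave_lst.drop 1), p.1.length ≤ p.2.length
instance (wave_lst : List (List Int)) : Decidable (Pre_slow_down_wave wave_lst) := by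
  unfold Pre_slow_down_wave; infer_instance
def pvWitness_slow_down_wave : List (List Int) := [[0, 3], [4, 9], [6, 7]]

def Spec_slow_down_wave (wave_lst : List (List Int)) (out : List (List Int)) : Prop :=
  out = slow_down_wave_alt wave_lst
instance (wave_lst : List (List Int)) (out : List (List Int)) : Decidable (Spec_slow_down_wave wave_lst out) := by
  unfold Spec_slow_down_wave; infer_instance

-- ===== CLAIM (what is proved, stated in full; the proofs are below) =====
def Claim_equal_slow_down_wave : Prop :=
  ∀ (wave_lst : List (List Int)), Dom_slow_down_wave wave_lst →
    Pre_slow_down_wave wave_lst → Spec_slow_down_wave wave_lst (slow_down_wave wave_lst)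

-- ===== LEMMAS AND PROOFS =====

-- the common per-pair average function
def pvAvg (p : List Int × List Int) : List Int :=
  (p.1.zip p.2).map (fun q => (q.1 + q.2).tdiv 2)

lemma pv_avg_eq (l1 l2 : List Int) (h : l1.length ≤ l2.length) :
    create_list_for_average l1 l2 = pvAvg (l1, l2) := by
  unfold create_list_for_average pvAvg
  rw [PySem.List.foldl_append_singleton_eq_map, List.nil_append]
  apply List.ext_getElem
  · simp [PySem.List.length_pyRange_one]
    omega
  · intro k hk1 hk2
    have hk : k < l1.length := by
      simp [PySem.List.length_pyRange_one] at hk1; omega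
    have hk2' : k < l2.length := lt_of_lt_of_le hk h
    simp only [List.getElem_map, PySem.List.getElem_pyRange_one, List.getElem_zip]
    rw [show ((0 : Int) + (k : Int)) = ((k : Nat) : Int) by omega]
    rw [PySem.List.pyGetD_eq_getElem _ _ (by omega) (by omega),
        PySem.List.pyGetD_eq_getElem _ _ (by omega) (by omega)]
    simp

-- A's first pass equals the adjacent-pair averages
lemma pv_avg_list (wl : List (List Int))
    (hpre : ∀ p ∈ wl.zip (wl.drop 1), p.1.length ≤ p.2.length) :
    (PySem.List.pyRange 0 ((wl.length : Int) - 1) 1).foldl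
      (fun acc i =>
        acc ++ [create_list_for_average (PySem.List.pyGetD wl i [])
                  (PySem.List.pyGetD wl (i + 1) [])]) []
    = (wl.zip (wl.drop 1)).map pvAvg := by
  rw [PySem.List.foldl_append_singleton_eq_map, List.nil_append]
  apply List.ext_getElem
  · simp [PySem.List.length_pyRange_one, List.length_zip]
  · intro k hk1 hk2
    have hk : k + 1 < wl.length := by
      simp [PySem.List.length_pyRange_one] at hk1; omega
    simp only [List.getElem_map, PySem.List.getElem_pyRange_one]
    rw [show ((0 : Int) + (k : Int)) = ((k : Nat) : Int) by omega]
    rw [show ((k : Nat) : Int) + 1 = (((k + 1 : Nat)) : Int) by push_cast; ring]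
    rw [PySem.List.pyGetD_eq_getElem _ _ (by omega) (by omega),
        PySem.List.pyGetD_eq_getElem _ _ (by omega) (by omega)]
    have hkP : k < (wl.zip (wl.drop 1)).length := by
      simp [List.length_zip]; omega
    have hPk : (wl.zip (wl.drop 1))[k]'hkP
        = (wl[k]'(by omega), wl[k+1]'hk) := by
      simp [List.getElem_zip]
    have hle : (wl[k]'(by omega)).length ≤ (wl[k+1]'hk).length := by
      have := hpre _ (List.getElem_mem hkP)
      rwa [hPk] at this
    simp only [Int.toNat_natCast]
    rw [pv_avg_eq _ _ hle, hPk]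

-- generic: length / elements of a flatMap of two-element blocks
lemma pv_flatMap_pair_length {α β : Type} (l : List α) (f g : α → β) :
    (l.flatMap (fun x => [f x, g x])).length = 2 * l.length := by
  induction l with
  | nil => simp
  | cons a t ih => simp [ih]; omega

lemma pv_flatMap_pair_getElem {α β : Type} (l : List α) (f g : α → β)
    (k : Nat) (hk : k < 2 * l.length) (hk2 : k / 2 < l.length) :
    (l.flatMap (fun x => [f x, g x]))[k]'(by rw [pv_flatMap_pair_length]; exact hk)
      = if k % 2 = 0 then f (l[k / 2]'hk2) else g (l[k / 2]'hk2) := by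
  induction l generalizing k with
  | nil => simp at hk
  | cons a t ih =>
    match k with
    | 0 => simp
    | 1 => simp
    | (m + 2) =>
      have hm : m < 2 * t.length := by simp at hk; omega
      have hm2 : m / 2 < t.length := by omega
      have : (((a :: t).flatMap (fun x => [f x, g x]))[m + 2]'(by
          rw [pv_flatMap_pair_length]; simpa using hk))
          = ((t.flatMap (fun x => [f x, g x]))[m]'(by
          rw [pv_flatMap_pair_length]; exact hm)) := by
        simp [List.flatMap_cons]
      rw [this, ih m hm hm2]
      have hdiv : (m + 2) / 2 = m / 2 + 1 := by omega
      have hmod : (m + 2) % 2 = m % 2 := by omega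
      simp [hdiv, hmod]

-- A equals the common normal form: pair blocks then the last frame
lemma pv_A_norm (wl : List (List Int))
    (hpre : ∀ p ∈ wl.zip (wl.drop 1), p.1.length ≤ p.2.length) (hne : wl ≠ []) :
    slow_down_wave wl
      = (wl.zip (wl.drop 1)).flatMap (fun p => [p.1, pvAvg p]) ++ [wl.getLast hne] := by
  unfold slow_down_wave
  rw [pv_avg_list wl hpre]
  have hn : 1 ≤ (wl.length : Int) := by
    cases wl with
    | nil => exact absurd rfl hne
    | cons a t => simp
  set n : Int := (wl.length : Int) with hnn
  set P := wl.zip (wl.drop 1) with hP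
  have hPlen : (P.length : Int) = n - 1 := by
    simp [hP, hnn, List.length_zip]; omega
  have hmlen : (((P.map pvAvg).length : Int)) = n - 1 := by simp [hPlen]
  have hsplit : PySem.List.pyRange 0 n 1
      = PySem.List.pyRange 0 (n - 1) 1 ++ [n - 1] := by
    rw [show n = (n - 1) + 1 by ring, PySem.List.pyRange_one_succ_right (by omega)]
    ring_nf
  rw [hsplit, List.foldl_append]
  simp only [List.foldl_cons, List.foldl_nil]
  rw [if_neg (by rw [hmlen]; omega)]
  have hbody :
      (PySem.List.pyRange 0 (n - 1) 1).foldl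
        (fun acc j =>
          let acc' := acc ++ [PySem.List.pyGetD wl j []]
          if ¬ (j > ((P.map pvAvg).length : Int) - 1) then
            acc' ++ [PySem.List.pyGetD (P.map pvAvg) j []]
          else acc') []
      = P.flatMap (fun p => [p.1, pvAvg p]) := by
    rw [PySem.List.foldl_congr_mem _ _
        (fun acc j =>
          acc ++ [(PySem.List.pyGetD P j ([], [])).1,
                  pvAvg (PySem.List.pyGetD P j ([], []))]) []
        (by
          intro acc j hj
          rw [PySem.List.mem_pyRange_one] at hj
          have hjn : j.toNat < P.length := by omega
          have hjw : j.toNat < wl.length := by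
            simp [hP, List.length_zip] at hjn ⊢; omega
          have hfst : (P[j.toNat]'hjn).1 = wl[j.toNat]'hjw := by
            simp [hP, List.getElem_zip]
          have e1 : PySem.List.pyGetD wl j [] = wl[j.toNat]'hjw :=
            PySem.List.pyGetD_eq_getElem _ _ (by omega) (by omega)
          have e2 : PySem.List.pyGetD (P.map pvAvg) j []
              = (P.map pvAvg)[j.toNat]'(by simp; omega) :=
            PySem.List.pyGetD_eq_getElem _ _ (by omega) (by simp; omega)
          have e3 : PySem.List.pyGetD P j ([], []) = P[j.toNat]'hjn :=
            PySem.List.pyGetD_eq_getElem _ _ (by omega) (by omega)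
          simp only [e1, e2, e3]
          rw [if_pos (by rw [hmlen]; omega)]
          simp [List.getElem_map, hfst])]
    rw [show (n - 1 : Int) = (P.length : Int) by omega]
    rw [PySem.List.foldl_pyRange_zero_pyGetD' P ([], [])
          (fun acc p => acc ++ [p.1, pvAvg p]) []]
    rw [PySem.List.foldl_append_eq_flatMap
          (g := fun p : List Int × List Int => [p.1, pvAvg p])]
    rfl
  rw [hbody]
  have hget : PySem.List.pyGetD wl (n - 1) [] = wl.getLast hne := by
    rw [show (n - 1 : Int) = ((wl.length - 1 : Nat) : Int) by omega]
    rw [PySem.List.pyGetD_natCast,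
        List.getD_eq_getElem wl [] (by omega),
        List.getLast_eq_getElem]
  rw [hget]

-- B's odd-slot comprehension equals pvAvg on the two neighbouring frames
lemma pv_B_avg (l1 l2 : List Int) (h : l1.length ≤ l2.length) :
    (PySem.List.pyRange 0 (l1.length : Int) 1).map
      (fun t => (PySem.List.pyGetD l1 t 0 + PySem.List.pyGetD l2 t 0).tdiv 2)
    = pvAvg (l1, l2) := by
  unfold pvAvg
  apply List.ext_getElem
  · simp [PySem.List.length_pyRange_one]
    omega
  · intro k hk1 hk2
    have hk : k < l1.length := by
      simp [PySem.List.length_pyRange_one] at hk1; omega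
    simp only [List.getElem_map, PySem.List.getElem_pyRange_one, List.getElem_zip]
    rw [show ((0 : Int) + (k : Int)) = ((k : Nat) : Int) by omega]
    rw [PySem.List.pyGetD_eq_getElem _ _ (by omega) (by omega),
        PySem.List.pyGetD_eq_getElem _ _ (by omega) (by omega)]
    simp

-- B equals the same normal form
lemma pv_B_norm (wl : List (List Int))
    (hpre : ∀ p ∈ wl.zip (wl.drop 1), p.1.length ≤ p.2.length) (hne : wl ≠ []) :
    slow_down_wave_alt wl
      = (wl.zip (wl.drop 1)).flatMap (fun p => [p.1, pvAvg p]) ++ [wl.getLast hne] := by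
  unfold slow_down_wave_alt
  have hn : 1 ≤ (wl.length : Int) := by
    cases wl with
    | nil => exact absurd rfl hne
    | cons a t => simp
  set n : Int := (wl.length : Int) with hnn
  set P := wl.zip (wl.drop 1) with hP
  have hPlen : P.length = wl.length - 1 := by
    simp [hP, List.length_zip]
  apply List.ext_getElem
  · rw [List.length_map, PySem.List.length_pyRange_one, List.length_append,
        pv_flatMap_pair_length, hPlen]
    simp; omega
  · intro k hk1 hk2
    have hkn : (k : Int) < 2 * n - 1 := by
      rw [List.length_map, PySem.List.length_pyRange_one] at hk1; omega
    have hkw : k / 2 < wl.length := by omega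
    simp only [List.getElem_map, PySem.List.getElem_pyRange_one]
    rw [show ((0 : Int) + (k : Int)) = ((k : Nat) : Int) by omega]
    have hfd : PySem.Int.floordiv ((k : Nat) : Int) 2 = ((k / 2 : Nat) : Int) := by
      simp [PySem.Int.floordiv, Int.fdiv_eq_ediv]
    have e0 : PySem.List.pyGetD wl (PySem.Int.floordiv ((k : Nat) : Int) 2) []
        = wl[k / 2]'hkw := by
      rw [hfd, PySem.List.pyGetD_natCast, List.getD_eq_getElem wl [] hkw]
    by_cases hpar : k % 2 = 0
    · -- even slot
      rw [if_pos (by omega), e0]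
      by_cases hlast : k < 2 * (wl.length - 1)
      · have hkP : k / 2 < P.length := by omega
        rw [List.getElem_append_left (by rw [pv_flatMap_pair_length]; omega)]
        rw [pv_flatMap_pair_getElem P _ _ k (by omega) hkP]
        rw [if_pos hpar]
        simp [hP, List.getElem_zip]
      · -- k = 2*(len-1): the trailing last element
        have hkeq : k = 2 * (wl.length - 1) := by omega
        have hlen : (P.flatMap (fun p => [p.1, pvAvg p])).length = k := by
          rw [pv_flatMap_pair_length, hPlen]; omega
        rw [List.getElem_append_right (by omega)]
        simp only [hlen, Nat.sub_self, List.getElem_singleton]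
        rw [List.getLast_eq_getElem]
        congr 1
        omega
    · -- odd slot
      rw [if_neg (by omega)]
      have hkP : k / 2 < P.length := by omega
      have hkw1 : k / 2 + 1 < wl.length := by omega
      have e1 : PySem.List.pyGetD wl (PySem.Int.floordiv ((k : Nat) : Int) 2 + 1) []
          = wl[k / 2 + 1]'hkw1 := by
        rw [hfd, show ((k / 2 : Nat) : Int) + 1 = (((k / 2 + 1 : Nat)) : Int) by push_cast; ring]
        rw [PySem.List.pyGetD_natCast, List.getD_eq_getElem wl [] hkw1]
      rw [List.getElem_append_left (by rw [pv_flatMap_pair_length]; omega)]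
      rw [pv_flatMap_pair_getElem P _ _ k (by omega) hkP]
      rw [if_neg hpar]
      have hPk : P[k / 2]'hkP = (wl[k / 2]'hkw, wl[k / 2 + 1]'hkw1) := by
        simp [hP, List.getElem_zip]
      have hle : (wl[k / 2]'hkw).length ≤ (wl[k / 2 + 1]'hkw1).length := by
        have := hpre _ (List.getElem_mem hkP)
        rwa [hPk] at this
      rw [e0, e1, pv_B_avg _ _ hle, hPk]

-- ===== VERDICT (by name: the statement is the Claim_ definition above) =====
theorem slow_down_wave_spec : Claim_equal_slow_down_wave := by
  intro wl _hdom hpre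
  unfold Spec_slow_down_wave
  cases h : wl with
  | nil =>
    subst h
    simp [slow_down_wave, slow_down_wave_alt, PySem.List.pyRange_one_eq_nil]
  | cons a t =>
    subst h
    rw [pv_A_norm _ hpre (by simp), pv_B_norm _ hpre (by simp)]
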